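-- pv_equiv track=rewrite | github.com/jianc99/FlexPipe | pipe/utils.py | gen_include_layers
-- ===== SOURCE A (Python) =====
-- def gen_include_layers(current_stage, layer_partition):
--     start_idx = 0
--     stage_indices = []
--     for part in layer_partition:
--         indices = list(range(start_idx, start_idx + part))
--         stage_indices.append(indices)
--         start_idx += part
--     return stage_indices[current_stage]
-- ===== SOURCE B (Python) =====
-- def gen_include_layers(current_stage, layer_partition):
--     idx = current_stage if current_stage >= 0 else current_stage + len(layer_partition)
--     offset = sum(layer_partition[:idx])
--     part = layer_partition[idx]
--     return list(range(offset, offset + part))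
-- ===== Notes on version B (the rewrite author's own statement) =====
-- stated objective: faster
-- what changed: B computes only the requested stage's offset as a prefix sum of the partition up to the (normalized) index and builds that one range, instead of materializing the index lists of every stage and then selecting one.
import Mathlib
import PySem

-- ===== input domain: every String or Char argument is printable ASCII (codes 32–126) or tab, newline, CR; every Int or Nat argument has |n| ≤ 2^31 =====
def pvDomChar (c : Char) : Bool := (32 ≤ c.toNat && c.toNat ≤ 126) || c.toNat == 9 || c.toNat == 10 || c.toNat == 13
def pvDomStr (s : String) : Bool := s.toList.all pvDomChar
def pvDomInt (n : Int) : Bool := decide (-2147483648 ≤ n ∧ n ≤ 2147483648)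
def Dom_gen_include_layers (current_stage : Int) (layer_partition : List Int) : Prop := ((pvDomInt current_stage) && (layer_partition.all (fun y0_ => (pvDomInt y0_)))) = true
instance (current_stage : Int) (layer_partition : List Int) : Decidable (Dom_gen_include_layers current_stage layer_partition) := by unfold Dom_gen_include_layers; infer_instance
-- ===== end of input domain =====

-- B computes only the requested stage's offset (prefix sum up to the normalized
-- index) and builds that single range, instead of building every stage's list.

-- ===== PORT A =====
def gen_include_layers (current_stage : Int) (layer_partition : List Int) : List Int :=
  -- start_idx = 0; stage_indices = []; for part in layer_partition: append range, advance
  let st := layer_partition.foldl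
    (fun (s : Int × List (List Int)) part =>
      (s.1 + part, s.2 ++ [PySem.List.pyRange s.1 (s.1 + part) 1]))
    (0, [])
  -- stage_indices[current_stage]  (IndexError excluded by Pre_)
  (PySem.List.pyGet? st.2 current_stage).getD []

-- ===== PORT B =====
def gen_include_layers_alt (current_stage : Int) (layer_partition : List Int) : List Int :=
  let idx := if current_stage ≥ 0 then current_stage else current_stage + layer_partition.length
  let offset := (PySem.List.slice layer_partition (some 0) (some idx)).sum
  let part := (PySem.List.pyGet? layer_partition idx).getD 0   -- IndexError excluded by Pre_
  PySem.List.pyRange offset (offset + part) 1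

-- ===== PRECONDITION & SPEC =====
-- A raises IndexError iff current_stage is out of range for the stage list
def Pre_gen_include_layers (current_stage : Int) (layer_partition : List Int) : Prop :=
  PySem.Raise.InRange layer_partition.length current_stage
instance (current_stage : Int) (layer_partition : List Int) : Decidable (Pre_gen_include_layers current_stage layer_partition) := by unfold Pre_gen_include_layers; infer_instance
def pvWitness_gen_include_layers : Int × List Int := (1, [3, 2, 4])

def Spec_gen_include_layers (current_stage : Int) (layer_partition : List Int) (out : List Int) : Prop := out = gen_include_layers_alt current_stage layer_partition
instance (current_stage : Int) (layer_partition : List Int) (out : List Int) : Decidable (Spec_gen_include_layers current_stage layer_partition out) := by unfold Spec_gen_include_layers; infer_instance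

-- ===== CLAIM (what is proved, stated in full; the proofs are below) =====
def Claim_equal_gen_include_layers : Prop := ∀ (current_stage : Int) (layer_partition : List Int), Dom_gen_include_layers current_stage layer_partition → Pre_gen_include_layers current_stage layer_partition → Spec_gen_include_layers current_stage layer_partition (gen_include_layers current_stage layer_partition)

-- ===== LEMMAS AND PROOFS =====

/-- The list of per-stage ranges A's loop builds, as a structural recursion. -/
def pvStages (s : Int) (lp : List Int) : List (List Int) :=
  match lp with
  | [] => []
  | p :: rest => PySem.List.pyRange s (s + p) 1 :: pvStages (s + p) rest

lemma pvStages_length (lp : List Int) : ∀ (s : Int), (pvStages s lp).length = lp.length := by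
  induction lp with
  | nil => intro s; rfl
  | cons p rest ih => intro s; simp [pvStages, ih]

lemma foldA_eq (lp : List Int) : ∀ (s : Int) (acc : List (List Int)),
    lp.foldl (fun (st : Int × List (List Int)) part =>
      (st.1 + part, st.2 ++ [PySem.List.pyRange st.1 (st.1 + part) 1])) (s, acc)
    = (s + lp.sum, acc ++ pvStages s lp) := by
  induction lp with
  | nil => intro s acc; simp [pvStages]
  | cons p rest ih =>
    intro s acc
    simp only [List.foldl, pvStages, ih]
    simp only [List.sum_cons, Prod.mk.injEq]
    exact ⟨by ring, by simp⟩

lemma pvStages_getElem? (lp : List Int) : ∀ (s : Int) (k : Nat), k < lp.length →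
    (pvStages s lp)[k]? =
      some (PySem.List.pyRange (s + (lp.take k).sum)
        (s + (lp.take k).sum + lp[k]!) 1) := by
  induction lp with
  | nil => intro s k hk; simp at hk
  | cons p rest ih =>
    intro s k hk
    cases k with
    | zero => simp [pvStages]
    | succ n =>
      have hn : n < rest.length := by simpa using hk
      simp [pvStages, ih (s + p) n hn]
      ring_nf

-- ===== VERDICT (by name: the statement is the Claim_ definition above) =====
theorem gen_include_layers_spec : Claim_equal_gen_include_layers := by
  intro cs lp _ hpre
  unfold Pre_gen_include_layers PySem.Raise.InRange at hpre
  obtain ⟨hlo, hhi⟩ := hpre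
  unfold Spec_gen_include_layers gen_include_layers gen_include_layers_alt
  simp only [foldA_eq, List.nil_append]
  by_cases hcs : cs ≥ 0
  · -- nonnegative index: k = cs.toNat
    set k : Nat := cs.toNat with hkdef
    have hcsk : cs = (k : Int) := by omega
    have hk : k < lp.length := by omega
    rw [hcsk, if_pos (by omega)]
    rw [PySem.List.pyGet?_natCast, PySem.List.pyGet?_natCast]
    rw [pvStages_getElem? lp 0 k hk]
    simp [PySem.List.slice_to_natCast, List.getElem!_eq_getElem?_getD,
      List.getElem?_eq_getElem hk]
  · -- negative index: cs = -(k':ℤ), position k = lp.length - k'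
    set k' : Nat := (-cs).toNat with hkdef
    have hcsk : cs = -(k' : Int) := by omega
    have h0 : 0 < k' := by omega
    have hle : k' ≤ lp.length := by omega
    have hle' : k' ≤ (pvStages 0 lp).length := by rw [pvStages_length]; exact hle
    set k : Nat := lp.length - k' with hk2
    have hk : k < lp.length := by omega
    rw [hcsk, if_neg (by omega)]
    have hidx : -(k' : Int) + (lp.length : Int) = (k : Int) := by omega
    rw [hidx, PySem.List.pyGet?_neg_natCast _ k' h0 hle', PySem.List.pyGet?_natCast]
    rw [pvStages_length, ← hk2]
    rw [pvStages_getElem? lp 0 k hk]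
    simp [PySem.List.slice_to_natCast, List.getElem!_eq_getElem?_getD,
      List.getElem?_eq_getElem hk]
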